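-- pv_equiv track=rewrite | github.com/Balcalli17/Ing-Sistemas-UPEA-by-Balcalli | Practicando la Cabeza/20-09-2025/PyBalcalli - copia/2ejercicio.py | moverv
-- ===== SOURCE A (Python) =====
-- def moverv(tam,vec):
--     m = tam // 2 - 1
--     a = 0
--     b = 1
--     for i in range(0,m+1,1):
--         c = a + b
--         vec[i] = a
--         a = b
--         b = c
--         c = a + b
--         vec[tam-i-1] = a
--         a = b
--         b = c
--     if tam % 2 == 1:
--         vec[m+1] = a
--     return vec
-- ===== SOURCE B (Python) =====
-- def moverv(tam, vec):
--     fib = []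
--     a, b = 0, 1
--     for _ in range(tam):
--         fib.append(a)
--         a, b = b, a + b
--     left, right = 0, tam - 1
--     for k, v in enumerate(fib):
--         if k % 2 == 0:
--             vec[left] = v
--             left += 1
--         else:
--             vec[right] = v
--             right -= 1
--     return vec
-- ===== Notes on version B (the rewrite author's own statement) =====
-- stated objective: alternative
-- what changed: A interleaves everything in one fused loop, recomputing the Fibonacci pair twice per iteration while writing front and back slots; B separates concerns: a first loop builds the list of tam Fibonacci numbers, then a second two-pointer pass writes even-indexed ones to the front and odd-indexed ones to the back.
-- outside the precondition, e.g. on moverv(-1, [9, 9]): A returns [9, 0], B returns [9, 9]; on moverv(-2, []): A returns [], B returns []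
import Mathlib
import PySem

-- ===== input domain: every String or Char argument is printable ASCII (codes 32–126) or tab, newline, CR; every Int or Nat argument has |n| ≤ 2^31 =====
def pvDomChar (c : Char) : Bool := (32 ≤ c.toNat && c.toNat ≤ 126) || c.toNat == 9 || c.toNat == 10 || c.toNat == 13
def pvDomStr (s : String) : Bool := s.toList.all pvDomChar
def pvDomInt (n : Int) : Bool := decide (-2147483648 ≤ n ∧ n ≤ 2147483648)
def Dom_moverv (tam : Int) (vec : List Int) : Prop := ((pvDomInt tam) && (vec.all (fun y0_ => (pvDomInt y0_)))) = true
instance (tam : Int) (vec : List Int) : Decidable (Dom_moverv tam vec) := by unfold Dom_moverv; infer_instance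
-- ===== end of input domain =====

-- B: instead of A's fused loop mutating front and back and re-deriving each Fibonacci pair in place,
-- B first builds the list of tam Fibonacci numbers, then a second two-pointer pass writes even-indexed
-- ones to the front and odd-indexed ones to the back (objective: alternative decomposition, same cost).
-- Both Pythons mutate `vec` in place and return it; the equivalence proved is about the return value.

-- ===== PORT A =====
-- loop body of A's for-loop, as a helper (state = (vec, a, b), argument = i)
def pvStepA (tam : Int) (st : List Int × Int × Int) (i : Int) : List Int × Int × Int :=
  let v := st.1; let a := st.2.1; let b := st.2.2
  let c := a + b
  let v := PySem.List.pySetD v i a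
  let a := b
  let b := c
  let c := a + b
  let v := PySem.List.pySetD v (tam - i - 1) a
  let a := b
  let b := c
  (v, a, b)

def moverv (tam : Int) (vec : List Int) : List Int :=
  let m := PySem.Int.floordiv tam 2 - 1
  let st := (PySem.List.pyRange 0 (m + 1) 1).foldl (pvStepA tam) (vec, 0, 1)
  let v := st.1
  let a := st.2.1
  if PySem.Int.mod tam 2 == 1 then PySem.List.pySetD v (m + 1) a else v

-- ===== PORT B =====
-- loop body of B's fib-building loop (state = (fib, a, b))
def pvStepFib (st : List Int × Int × Int) (_ : Int) : List Int × Int × Int :=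
  (st.1 ++ [st.2.1], st.2.2, st.2.1 + st.2.2)

-- loop body of B's two-pointer writing loop (state = (vec, left, right), argument = (k, value))
def pvStepB (st : List Int × Int × Int) (kv : Int × Int) : List Int × Int × Int :=
  let v := st.1; let left := st.2.1; let right := st.2.2
  if PySem.Int.mod kv.1 2 == 0 then (PySem.List.pySetD v left kv.2, left + 1, right)
  else (PySem.List.pySetD v right kv.2, left, right - 1)

def moverv_alt (tam : Int) (vec : List Int) : List Int :=
  let fst := (PySem.List.pyRange 0 tam 1).foldl pvStepFib ([], 0, 1)
  let fib := fst.1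
  let st2 := (PySem.List.enumerate fib 0).foldl pvStepB (vec, 0, tam - 1)
  st2.1

-- ===== PRECONDITION & SPEC =====
-- Pre_ excludes tam > len(vec), where A raises IndexError, and negative tam (outside the natural
-- domain of a fill-a-vector-of-size-tam routine), where A's odd-tam write wraps via a negative index.
def Pre_moverv (tam : Int) (vec : List Int) : Prop := 0 ≤ tam ∧ tam ≤ vec.length
instance (tam : Int) (vec : List Int) : Decidable (Pre_moverv tam vec) := by unfold Pre_moverv; infer_instance
def pvWitness_moverv : Int × List Int := (5, [7, 7, 7, 7, 7])

def Spec_moverv (tam : Int) (vec : List Int) (out : List Int) : Prop := out = moverv_alt tam vec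
instance (tam : Int) (vec : List Int) (out : List Int) : Decidable (Spec_moverv tam vec out) := by unfold Spec_moverv; infer_instance

-- ===== CLAIM (what is proved, stated in full; the proofs are below) =====
def Claim_equal_moverv : Prop := ∀ (tam : Int) (vec : List Int), Dom_moverv tam vec → Pre_moverv tam vec → Spec_moverv tam vec (moverv tam vec)

-- ===== LEMMAS AND PROOFS =====

-- Fibonacci, as Int
def pvF (k : Nat) : Int := (Nat.fib k : Int)

lemma pvF_add_two (k : Nat) : pvF (k + 2) = pvF k + pvF (k + 1) := by
  simp [pvF, Nat.fib_add_two]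

-- B's first loop builds the list of Fibonacci numbers
lemma pvFibBuild (l : List Int) : ∀ (acc : List Int) (k : Nat),
    l.foldl pvStepFib (acc, pvF k, pvF (k + 1))
      = (acc ++ (List.range l.length).map (fun t => pvF (k + t)), pvF (k + l.length), pvF (k + l.length + 1)) := by
  induction l with
  | nil => simp
  | cons x l ih =>
    intro acc k
    have h1 : pvF k + pvF (k + 1) = pvF (k + 1 + 1) := by
      rw [show k + 1 + 1 = k + 2 by omega, pvF_add_two]
    have hstep : (x :: l).foldl pvStepFib (acc, pvF k, pvF (k + 1))
        = l.foldl pvStepFib (acc ++ [pvF k], pvF (k + 1), pvF (k + 1 + 1)) := by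
      simp [pvStepFib, h1]
    rw [hstep, ih]
    have hf : (List.range l.length).map (fun t => pvF (k + 1 + t))
        = (List.range l.length).map (fun t => pvF (k + (t + 1))) := by
      apply List.map_congr_left; intro t _; congr 1; omega
    simp only [Prod.mk.injEq, List.length_cons]
    refine ⟨?_, ?_, ?_⟩
    · rw [hf, List.range_succ_eq_map]
      simp [List.map_map, Function.comp]
    · congr 1; omega
    · congr 1; omega

-- enumerate of a mapped range
lemma pvEnumMapRange (f : Nat → Int) : ∀ (n : Nat) (s : Int),
    PySem.List.enumerate ((List.range n).map f) s
      = (List.range n).map (fun (k : Nat) => ((s + k : Int), f k)) := by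
  intro n
  induction n with
  | zero => intro s; simp
  | succ n ih =>
    intro s
    rw [List.range_succ, List.map_append, PySem.List.enumerate_append, ih, List.map_append]
    simp [PySem.List.enumerate_cons, PySem.List.enumerate_nil]

-- main joint induction: one A-iteration = two B-steps
lemma pvPair (tam : Int) : ∀ (p : Nat) (v : List Int),
    (List.range p).foldl (fun st (k : Nat) => pvStepA tam st (k : Int)) (v, 0, 1)
      = (((List.range (2 * p)).foldl (fun st (k : Nat) => pvStepB st ((k : Int), pvF k)) (v, 0, tam - 1)).1,
          pvF (2 * p), pvF (2 * p + 1))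
    ∧ ((List.range (2 * p)).foldl (fun st (k : Nat) => pvStepB st ((k : Int), pvF k)) (v, 0, tam - 1)).2
        = ((p : Int), tam - 1 - (p : Int)) := by
  intro p
  induction p with
  | zero => intro v; simp [pvF]
  | succ p ih =>
    intro v
    obtain ⟨ihA, ihB⟩ := ih v
    have h2 : 2 * (p + 1) = (2 * p + 1) + 1 := by ring
    rw [h2, List.range_succ, List.range_succ, List.foldl_append, List.foldl_append,
        List.range_succ, List.foldl_append]
    set S := (List.range (2 * p)).foldl (fun st (k : Nat) => pvStepB st ((k : Int), pvF k)) (v, 0, tam - 1) with hS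
    rw [List.foldl_cons, List.foldl_nil, List.foldl_cons, List.foldl_nil, List.foldl_cons, List.foldl_nil]
    rw [ihA]
    have hSex : S = (S.1, (p : Int), tam - 1 - (p : Int)) := by
      rw [← ihB]
    rw [hSex]
    have hme : PySem.Int.mod ((2 * p : Nat) : Int) 2 = 0 := by
      have h := PySem.Int.mod_natCast (2 * p) 2
      rw [Nat.mul_mod_right] at h; exact_mod_cast h
    have hmo : PySem.Int.mod ((2 * p + 1 : Nat) : Int) 2 = 1 := by
      have h := PySem.Int.mod_natCast (2 * p + 1) 2
      rw [show (2 * p + 1) % 2 = 1 by omega] at h; exact_mod_cast h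
    simp only [pvStepA, pvStepB, hme, hmo]
    norm_num
    refine ⟨⟨by rw [show tam - (p : Int) - 1 = tam - 1 - (p : Int) by ring], ?_, ?_⟩, by ring⟩
    · rw [show 2 * p + 1 + 1 = 2 * p + 2 by omega, pvF_add_two]
    · rw [show 2 * p + 1 + 1 + 1 = (2 * p + 1) + 2 by omega, pvF_add_two,
          show 2 * p + 1 + 1 = 2 * p + 2 by omega, pvF_add_two]


-- ===== VERDICT (by name: the statement is the Claim_ definition above) =====
theorem moverv_spec : Claim_equal_moverv := by
  intro tam vec _ hpre
  obtain ⟨h0, _⟩ := hpre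
  simp only [Spec_moverv, moverv, moverv_alt]
  obtain ⟨n, rfl⟩ : ∃ n : Nat, tam = (n : Int) := ⟨tam.toNat, (Int.toNat_of_nonneg h0).symm⟩
  -- normalize A's range and B's two lists to folds over List.range
  have hfd : PySem.Int.floordiv (n : Int) 2 = ((n / 2 : Nat) : Int) := by
    exact_mod_cast PySem.Int.floordiv_natCast n 2
  have hmd : PySem.Int.mod (n : Int) 2 = ((n % 2 : Nat) : Int) := by
    exact_mod_cast PySem.Int.mod_natCast n 2
  have hRA : PySem.List.pyRange 0 (PySem.Int.floordiv (n : Int) 2 - 1 + 1) 1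
      = (List.range (n / 2)).map (fun (k : Nat) => (k : Int)) := by
    rw [PySem.List.pyRange_one, hfd]
    simp only [sub_add_cancel, sub_zero, Int.toNat_natCast, zero_add]
  have hRB : PySem.List.pyRange 0 (n : Int) 1 = (List.range n).map (fun (k : Nat) => (k : Int)) := by
    rw [PySem.List.pyRange_one]
    simp only [sub_zero, Int.toNat_natCast, zero_add]
  -- B's fib list
  have hfib : ((PySem.List.pyRange 0 (n : Int) 1).foldl pvStepFib ([], 0, 1)).1
      = (List.range n).map pvF := by
    rw [hRB]
    have hb := pvFibBuild ((List.range n).map (fun (k : Nat) => (k : Int))) [] 0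
    simp only [show pvF 0 = (0 : Int) by simp [pvF], show pvF (0 + 1) = (1 : Int) by simp [pvF]] at hb
    rw [hb]
    simp
  rw [hfib, pvEnumMapRange pvF n 0]
  simp only [zero_add]
  rw [hRA, List.foldl_map, List.foldl_map]
  -- split on parity of n
  rcases Nat.even_or_odd n with he | ho
  · obtain ⟨p, hp⟩ := he
    have hn : n = 2 * p := by omega
    subst hn
    have hdiv : 2 * p / 2 = p := by omega
    rw [hdiv]
    obtain ⟨ihA, _⟩ := pvPair ((2 * p : Nat) : Int) p vec
    rw [ihA]
    have : PySem.Int.mod ((2 * p : Nat) : Int) 2 = 0 := by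
      have h := PySem.Int.mod_natCast (2 * p) 2
      rw [Nat.mul_mod_right] at h; exact_mod_cast h
    simp
  · obtain ⟨p, hp⟩ := ho
    subst hp
    have hdiv : (2 * p + 1) / 2 = p := by omega
    rw [hdiv]
    have hsplit : List.range (2 * p + 1) = List.range (2 * p) ++ [2 * p] := List.range_succ
    rw [hsplit, List.foldl_append, List.foldl_cons, List.foldl_nil]
    obtain ⟨ihA, ihB⟩ := pvPair ((2 * p + 1 : Nat) : Int) p vec
    rw [ihA]
    set S := (List.range (2 * p)).foldl (fun st (k : Nat) => pvStepB st ((k : Int), pvF k)) (vec, 0, ((2 * p + 1 : Nat) : Int) - 1) with hS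
    have hSex : S = (S.1, (p : Int), ((2 * p + 1 : Nat) : Int) - 1 - (p : Int)) := by
      rw [← ihB]
    have hmo : PySem.Int.mod ((2 * p + 1 : Nat) : Int) 2 = 1 := by
      have h := PySem.Int.mod_natCast (2 * p + 1) 2
      rw [show (2 * p + 1) % 2 = 1 by omega] at h; exact_mod_cast h
    rw [hSex]
    simp only [pvStepB, hmo]
    have hmde : PySem.Int.mod ((2 * p : Nat) : Int) 2 = 0 := by
      have h := PySem.Int.mod_natCast (2 * p) 2
      rw [Nat.mul_mod_right] at h; exact_mod_cast h
    simp only [hmde]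
    norm_num
    rw [show (2 * (p : Int) + 1) / 2 = (p : Int) by omega]
    simp
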